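-- pv_equiv track=rewrite | github.com/CServinL/tbot | diffusiond/model_loader.py | detect_sdxl_model
-- ===== SOURCE A (Python) =====
-- def detect_sdxl_model(model_id: str) -> bool:
--     """Detect if this is an SDXL model based on the model ID"""
--     sdxl_indicators = [
--         "xl", "XL", "sdxl", "SDXL",
--         "realvisxl", "RealVisXL", "realvision_xl",
--         "juggernautxl", "JuggernautXL",
--         "dreamshaper-xl", "dreamshaper_xl", "DreamShaperXL"
--     ]
--     model_lower = model_id.lower()
--     return any(indicator.lower() in model_lower for indicator in sdxl_indicators)
-- ===== SOURCE B (Python) =====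
-- def detect_sdxl_model(model_id: str) -> bool:
--     """Detect if this is an SDXL model based on the model ID"""
--     # Every indicator in A's list contains "xl" after lowercasing, and "xl"
--     # itself is an indicator, so one substring test is equivalent.
--     return "xl" in model_id.lower()
-- ===== Notes on version B (the rewrite author's own statement) =====
-- stated objective: simpler
-- what changed: Replaced the 12-indicator list scan with a single substring test: every lowercased indicator contains "xl" and "xl" is itself an indicator, so the whole any(...) collapses to one membership check on the lowercased input.
import Mathlib
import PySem

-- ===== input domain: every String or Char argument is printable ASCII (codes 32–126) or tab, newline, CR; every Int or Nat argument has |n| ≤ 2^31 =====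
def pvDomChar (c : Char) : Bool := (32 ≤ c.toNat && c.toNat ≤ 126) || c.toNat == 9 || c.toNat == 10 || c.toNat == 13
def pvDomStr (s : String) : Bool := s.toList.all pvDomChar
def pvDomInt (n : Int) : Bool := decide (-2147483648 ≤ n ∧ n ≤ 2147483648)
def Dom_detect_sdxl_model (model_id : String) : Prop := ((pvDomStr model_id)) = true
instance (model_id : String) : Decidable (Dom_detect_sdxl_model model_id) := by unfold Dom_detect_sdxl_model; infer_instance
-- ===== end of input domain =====

-- B replaces A's 12-indicator any(...) scan by a single substring test ("xl" in model_id.lower()); objective: simpler.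

-- ===== PORT A =====
def detect_sdxl_model (model_id : String) : Bool :=
  let sdxl_indicators : List String :=
    ["xl", "XL", "sdxl", "SDXL",
     "realvisxl", "RealVisXL", "realvision_xl",
     "juggernautxl", "JuggernautXL",
     "dreamshaper-xl", "dreamshaper_xl", "DreamShaperXL"]
  let model_lower := PySem.Str.lower model_id
  sdxl_indicators.any (fun indicator => PySem.Str.isIn (PySem.Str.lower indicator) model_lower)

-- ===== PORT B =====
def detect_sdxl_model_alt (model_id : String) : Bool :=
  PySem.Str.isIn "xl" (PySem.Str.lower model_id)

-- ===== PRECONDITION & SPEC =====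
def Spec_detect_sdxl_model (model_id : String) (out : Bool) : Prop := out = detect_sdxl_model_alt model_id
instance (model_id : String) (out : Bool) : Decidable (Spec_detect_sdxl_model model_id out) := by unfold Spec_detect_sdxl_model; infer_instance

-- ===== CLAIM (what is proved, stated in full; the proofs are below) =====
def Claim_equal_detect_sdxl_model : Prop := ∀ (model_id : String), Dom_detect_sdxl_model model_id → Spec_detect_sdxl_model model_id (detect_sdxl_model model_id)

-- ===== LEMMAS AND PROOFS =====

-- If "xl" sits inside an indicator (after lowering) then any occurrence of that indicator implies an occurrence of "xl".
theorem isIn_xl_of_isIn (ind : String) (s : List Char)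
    (h : ('x' :: 'l' :: []) <:+: (PySem.Str.lower ind).toList)
    (hi : PySem.Chars.isIn (PySem.Str.lower ind).toList s = true) :
    PySem.Chars.isIn ('x' :: 'l' :: []) s = true := by
  rw [PySem.Chars.isIn_iff_infix] at hi ⊢
  exact h.trans hi

-- ===== VERDICT (by name: the statement is the Claim_ definition above) =====
theorem detect_sdxl_model_spec : Claim_equal_detect_sdxl_model := by
  intro m _
  show detect_sdxl_model m = detect_sdxl_model_alt m
  unfold detect_sdxl_model detect_sdxl_model_alt
  simp only [PySem.Str.isIn]
  have hxl : ("xl" : String).toList = ('x' :: 'l' :: []) := by decide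
  rw [hxl]
  apply Bool.eq_iff_iff.mpr
  rw [List.any_eq_true]
  constructor
  · rintro ⟨ind, hmem, hp⟩
    fin_cases hmem <;> exact isIn_xl_of_isIn _ _ (by decide) hp
  · intro h
    refine ⟨"xl", by simp, ?_⟩
    have hl : (PySem.Str.lower "xl").toList = ('x' :: 'l' :: []) := by decide
    rw [hl]; exact h
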